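-- pv_equiv track=rewrite | github.com/jc-wilson/ValScanner | frontend/QApplication.py | get_map_sections
-- ===== SOURCE A (Python) =====
-- MAP_SECTION_MAPS = {
--     "Competitive": [
--         "b529448b-4d60-346e-e89e-00a4c527a405",
--         "2fe4ed3a-450a-948b-6d6b-e89a78e680a9",
--         "2bee0dc9-4ffe-519b-1cbd-7fbe763a6047",
--         "2c9d57ec-4431-9c5e-2939-8f9ef6dd5cba",
--         "2fb9a4fd-47b8-4e7d-a969-74b4046ebd53",
--         "d960549e-485c-e861-8d71-aa9d1aed12a2",
--         "fd267378-4d1d-484f-ff52-77821ed10dc2",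
--     ],
--     "Standard": [
--         "224b0a95-48b9-f703-1bd8-67aca101a61f",
--         "7eaecc1b-4337-bbf6-6ab9-04b8f06b3319",
--         "92584fbe-486a-b1b2-9faa-39b0f486b498",
--         "1c18ab1f-420d-0d8b-71d0-77ad3c439115",
--         "e2ad5c54-4114-a870-9641-8ea21279579a",
--     ],
--     "Team Deathmatch": [
--         "2c09d728-42d5-30d8-43dc-96a05cc7ee9d",
--         "690b3ed2-4dff-945b-8223-6da834e30d24",
--         "12452a9d-48c3-0b02-e7eb-0381c3520404",
--         "d6336a5a-428f-c591-98db-c8a291159134",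
--         "de28aa9b-4cbe-1003-320e-6cb3ec309557",
--     ],
-- }
--
-- MAP_SECTION_ORDER = ["Competitive", "Standard", "Team Deathmatch"]
--
-- def get_map_sections(map_uuids):
--     section_map_uuids = []
--     assigned = set()
--     available = set(map_uuids)
--
--     for section_name in MAP_SECTION_ORDER:
--         configured = [map_uuid for map_uuid in MAP_SECTION_MAPS.get(section_name, []) if map_uuid in available]
--         assigned.update(configured)
--         section_map_uuids.append((section_name, configured))
--
--     leftovers = [map_uuid for map_uuid in map_uuids if map_uuid not in assigned]
--     for index, (section_name, configured) in enumerate(section_map_uuids):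
--         if section_name == "Standard":
--             section_map_uuids[index] = (section_name, configured + leftovers)
--             leftovers = []
--             break
--
--     if leftovers:
--         section_map_uuids.append(("Unassigned", leftovers))
--
--     return section_map_uuids
-- ===== SOURCE B (Python) =====
-- MAP_SECTION_MAPS = {
--     "Competitive": [
--         "b529448b-4d60-346e-e89e-00a4c527a405",
--         "2fe4ed3a-450a-948b-6d6b-e89a78e680a9",
--         "2bee0dc9-4ffe-519b-1cbd-7fbe763a6047",
--         "2c9d57ec-4431-9c5e-2939-8f9ef6dd5cba",
--         "2fb9a4fd-47b8-4e7d-a969-74b4046ebd53",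
--         "d960549e-485c-e861-8d71-aa9d1aed12a2",
--         "fd267378-4d1d-484f-ff52-77821ed10dc2",
--     ],
--     "Standard": [
--         "224b0a95-48b9-f703-1bd8-67aca101a61f",
--         "7eaecc1b-4337-bbf6-6ab9-04b8f06b3319",
--         "92584fbe-486a-b1b2-9faa-39b0f486b498",
--         "1c18ab1f-420d-0d8b-71d0-77ad3c439115",
--         "e2ad5c54-4114-a870-9641-8ea21279579a",
--     ],
--     "Team Deathmatch": [
--         "2c09d728-42d5-30d8-43dc-96a05cc7ee9d",
--         "690b3ed2-4dff-945b-8223-6da834e30d24",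
--         "12452a9d-48c3-0b02-e7eb-0381c3520404",
--         "d6336a5a-428f-c591-98db-c8a291159134",
--         "de28aa9b-4cbe-1003-320e-6cb3ec309557",
--     ],
-- }
--
-- MAP_SECTION_ORDER = ["Competitive", "Standard", "Team Deathmatch"]
--
--
-- def get_map_sections(map_uuids):
--     # reverse index: uuid -> (its section, its position within that section)
--     rindex = {}
--     for name in MAP_SECTION_ORDER:
--         for pos, u in enumerate(MAP_SECTION_MAPS[name]):
--             rindex[u] = (name, pos)
--
--     # one classification pass over the input
--     hits = {name: set() for name in MAP_SECTION_ORDER}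
--     leftovers = []
--     for u in map_uuids:
--         if u in rindex:
--             name, pos = rindex[u]
--             hits[name].add(pos)
--         else:
--             leftovers.append(u)
--
--     # rebuild each section from its hit positions; leftovers join "Standard"
--     result = []
--     for name in MAP_SECTION_ORDER:
--         section = MAP_SECTION_MAPS[name]
--         configured = [section[i] for i in sorted(hits[name])]
--         if name == "Standard":
--             configured += leftovers
--         result.append((name, configured))
--     return result
-- ===== Notes on version B (the rewrite author's own statement) =====
-- stated objective: alternative
-- what changed: B replaces A's three per-section filters of the constant lists plus a patch pass with a single classification pass over the input: a precomputed reverse index uuid->(section,position) routes each input uuid into a per-section position set or the leftovers list, and each section is rebuilt by indexing its constant list at the sorted hit positions, with leftovers appended to Standard inline.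
import Mathlib
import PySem

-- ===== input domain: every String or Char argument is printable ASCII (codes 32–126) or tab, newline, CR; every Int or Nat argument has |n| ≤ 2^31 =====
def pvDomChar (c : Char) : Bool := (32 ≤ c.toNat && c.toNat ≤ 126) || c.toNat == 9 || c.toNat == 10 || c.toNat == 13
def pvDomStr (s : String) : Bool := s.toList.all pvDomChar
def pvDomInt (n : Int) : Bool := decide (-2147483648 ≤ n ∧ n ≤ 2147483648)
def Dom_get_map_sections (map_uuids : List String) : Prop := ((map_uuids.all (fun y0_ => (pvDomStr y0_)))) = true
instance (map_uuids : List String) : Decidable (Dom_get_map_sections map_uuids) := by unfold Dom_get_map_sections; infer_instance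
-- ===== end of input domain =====

-- B replaces A's per-section membership filters and patch pass with one classification
-- pass over the input through a precomputed reverse index uuid -> (section, position),
-- rebuilding each section by indexing its constant list at the sorted hit positions
-- (objective: alternative decomposition, not speed).

-- module constants (shared by both Pythons)
def pvMaps : PySem.Dict String (List String) := PySem.Dict.ofList [
  ("Competitive", [
    "b529448b-4d60-346e-e89e-00a4c527a405",
    "2fe4ed3a-450a-948b-6d6b-e89a78e680a9",
    "2bee0dc9-4ffe-519b-1cbd-7fbe763a6047",
    "2c9d57ec-4431-9c5e-2939-8f9ef6dd5cba",
    "2fb9a4fd-47b8-4e7d-a969-74b4046ebd53",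
    "d960549e-485c-e861-8d71-aa9d1aed12a2",
    "fd267378-4d1d-484f-ff52-77821ed10dc2"]),
  ("Standard", [
    "224b0a95-48b9-f703-1bd8-67aca101a61f",
    "7eaecc1b-4337-bbf6-6ab9-04b8f06b3319",
    "92584fbe-486a-b1b2-9faa-39b0f486b498",
    "1c18ab1f-420d-0d8b-71d0-77ad3c439115",
    "e2ad5c54-4114-a870-9641-8ea21279579a"]),
  ("Team Deathmatch", [
    "2c09d728-42d5-30d8-43dc-96a05cc7ee9d",
    "690b3ed2-4dff-945b-8223-6da834e30d24",
    "12452a9d-48c3-0b02-e7eb-0381c3520404",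
    "d6336a5a-428f-c591-98db-c8a291159134",
    "de28aa9b-4cbe-1003-320e-6cb3ec309557"])]

def pvOrder : List String := ["Competitive", "Standard", "Team Deathmatch"]

-- ===== PORT A =====
-- A's second loop: 'for index, (section_name, configured) in enumerate(...): if name == "Standard": patch; leftovers = []; break'
def pvPatchA : List (String × List String) → List String → List (String × List String) × List String
  | [], leftovers => ([], leftovers)
  | (name, conf) :: rest, leftovers =>
    if name == "Standard" then ((name, conf ++ leftovers) :: rest, [])
    else
      let r := pvPatchA rest leftovers
      ((name, conf) :: r.1, r.2)

def get_map_sections (map_uuids : List String) : List (String × List String) :=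
  let available : PySem.Set String := PySem.Set.ofList map_uuids
  let st := pvOrder.foldl (fun (st : List (String × List String) × PySem.Set String) section_name =>
      let configured := (pvMaps.getD section_name []).filter (fun u => PySem.Set.contains available u)
      (st.1 ++ [(section_name, configured)], PySem.Set.update st.2 configured))
    ([], PySem.Set.empty)
  let leftovers := map_uuids.filter (fun u => !(PySem.Set.contains st.2 u))
  let p := pvPatchA st.1 leftovers
  if p.2.isEmpty then p.1 else p.1 ++ [("Unassigned", p.2)]

-- ===== PORT B =====
-- reverse index built by the first double loop ('for name in MAP_SECTION_ORDER: for pos, u in enumerate(...)');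
-- MAP_SECTION_MAPS[name] is ported as getD (exact: every name of MAP_SECTION_ORDER is a key);
-- enumerate is ported as zipIdx with Nat positions (exact: enumerate counts 0,1,2,…)
def pvRIndex : PySem.Dict String (String × Nat) :=
  pvOrder.foldl (fun d name =>
    (pvMaps.getD name []).zipIdx.foldl (fun d pu => d.insert pu.1 (name, pu.2)) d)
    PySem.Dict.empty

-- 'hits = {name: set() for name in MAP_SECTION_ORDER}'
def pvHits0 : PySem.Dict String (PySem.Set Nat) :=
  pvOrder.foldl (fun d name => d.insert name PySem.Set.empty) PySem.Dict.empty

-- classification step: Python's 'if u in rindex: name, pos = rindex[u]; hits[name].add(pos) else: leftovers.append(u)'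
-- ported as one match on get? (exact: 'u in rindex' is get? isSome); hits[name] mutation is modify
-- with default [] (exact: name is always a key of hits)
def pvStep (st : PySem.Dict String (PySem.Set Nat) × List String) (u : String) :
    PySem.Dict String (PySem.Set Nat) × List String :=
  match pvRIndex.get? u with
  | some (name, pos) => (st.1.modify name [] (fun s => PySem.Set.add s pos), st.2)
  | none => (st.1, st.2 ++ [u])

def get_map_sections_alt (map_uuids : List String) : List (String × List String) :=
  let st := map_uuids.foldl pvStep (pvHits0, [])
  -- rebuild: 'configured = [section[i] for i in sorted(hits[name])]'; section[i] ported as getD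
  -- (exact: every hit position comes from enumerate, hence is in range)
  pvOrder.foldl (fun acc name =>
    let sec := pvMaps.getD name []
    let configured := (PySem.List.sorted (st.1.getD name []) (fun x => x) false).map
      (fun i => sec.getD i "")
    let configured := if name == "Standard" then configured ++ st.2 else configured
    acc ++ [(name, configured)]) []

-- ===== PRECONDITION & SPEC =====
def Spec_get_map_sections (map_uuids : List String) (out : List (String × List String)) : Prop := out = get_map_sections_alt map_uuids
instance (map_uuids : List String) (out : List (String × List String)) : Decidable (Spec_get_map_sections map_uuids out) := by unfold Spec_get_map_sections; infer_instance

-- ===== CLAIM (what is proved, stated in full; the proofs are below) =====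
def Claim_equal_get_map_sections : Prop := ∀ (map_uuids : List String), Dom_get_map_sections map_uuids → Spec_get_map_sections map_uuids (get_map_sections map_uuids)

-- ===== LEMMAS AND PROOFS =====

-- proof-only shorthands
def pvL1 : List String := pvMaps.getD "Competitive" []
def pvL2 : List String := pvMaps.getD "Standard" []
def pvL3 : List String := pvMaps.getD "Team Deathmatch" []

def pvC (L xs : List String) : List String := L.filter (fun u => PySem.Set.contains (PySem.Set.ofList xs) u)

-- A's leftovers: filtered against the 'assigned' set of present section uuids
def pvLeftA (xs : List String) : List String :=
  xs.filter (fun u => !(PySem.Set.contains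
    (PySem.Set.update (PySem.Set.update (PySem.Set.update PySem.Set.empty (pvC pvL1 xs)) (pvC pvL2 xs)) (pvC pvL3 xs)) u))

theorem pvA_eq (xs : List String) :
    get_map_sections xs =
      [("Competitive", pvC pvL1 xs), ("Standard", pvC pvL2 xs ++ pvLeftA xs), ("Team Deathmatch", pvC pvL3 xs)] := rfl

-- the reverse index as a literal dict
theorem pvRIndexVal : pvRIndex = PySem.Dict.mk [
  ("b529448b-4d60-346e-e89e-00a4c527a405", ("Competitive", 0)),
  ("2fe4ed3a-450a-948b-6d6b-e89a78e680a9", ("Competitive", 1)),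
  ("2bee0dc9-4ffe-519b-1cbd-7fbe763a6047", ("Competitive", 2)),
  ("2c9d57ec-4431-9c5e-2939-8f9ef6dd5cba", ("Competitive", 3)),
  ("2fb9a4fd-47b8-4e7d-a969-74b4046ebd53", ("Competitive", 4)),
  ("d960549e-485c-e861-8d71-aa9d1aed12a2", ("Competitive", 5)),
  ("fd267378-4d1d-484f-ff52-77821ed10dc2", ("Competitive", 6)),
  ("224b0a95-48b9-f703-1bd8-67aca101a61f", ("Standard", 0)),
  ("7eaecc1b-4337-bbf6-6ab9-04b8f06b3319", ("Standard", 1)),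
  ("92584fbe-486a-b1b2-9faa-39b0f486b498", ("Standard", 2)),
  ("1c18ab1f-420d-0d8b-71d0-77ad3c439115", ("Standard", 3)),
  ("e2ad5c54-4114-a870-9641-8ea21279579a", ("Standard", 4)),
  ("2c09d728-42d5-30d8-43dc-96a05cc7ee9d", ("Team Deathmatch", 0)),
  ("690b3ed2-4dff-945b-8223-6da834e30d24", ("Team Deathmatch", 1)),
  ("12452a9d-48c3-0b02-e7eb-0381c3520404", ("Team Deathmatch", 2)),
  ("d6336a5a-428f-c591-98db-c8a291159134", ("Team Deathmatch", 3)),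
  ("de28aa9b-4cbe-1003-320e-6cb3ec309557", ("Team Deathmatch", 4))] := by decide

theorem pvLeft_inv (xs : List String) :
    ∀ st : PySem.Dict String (PySem.Set Nat) × List String,
      (xs.foldl pvStep st).2 = st.2 ++ xs.filter (fun u => (pvRIndex.get? u).isNone) := by
  induction xs with
  | nil => intro st; simp
  | cons u t ih =>
    intro st
    cases h : pvRIndex.get? u with
    | none => simp [pvStep, h, ih]
    | some p => simp [pvStep, h, ih]

theorem pvMem_inv (name : String) (xs : List String) :
    ∀ (st : PySem.Dict String (PySem.Set Nat) × List String) (i : Nat),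
      i ∈ (xs.foldl pvStep st).1.getD name [] ↔
        i ∈ st.1.getD name [] ∨ ∃ u ∈ xs, pvRIndex.get? u = some (name, i) := by
  induction xs with
  | nil => intro st i; simp
  | cons u t ih =>
    intro st i
    cases h : pvRIndex.get? u with
    | none =>
      simp only [List.foldl_cons, pvStep, h, List.mem_cons]
      rw [ih]
      constructor
      · rintro (h1 | ⟨v, hv, hv2⟩)
        · exact Or.inl h1
        · exact Or.inr ⟨v, Or.inr hv, hv2⟩
      · rintro (h1 | ⟨v, (rfl | hv), hv2⟩)
        · exact Or.inl h1
        · rw [h] at hv2; cases hv2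
        · exact Or.inr ⟨v, hv, hv2⟩
    | some p =>
      obtain ⟨n', pos⟩ := p
      simp only [List.foldl_cons, pvStep, h]
      rw [ih]
      by_cases hn : name = n'
      · subst hn
        rw [PySem.Dict.getD_modify, if_pos rfl, PySem.Set.mem_add]
        constructor
        · rintro ((h1 | rfl) | ⟨v, hv, hv2⟩)
          · exact Or.inl h1
          · exact Or.inr ⟨u, List.mem_cons_self, h⟩
          · exact Or.inr ⟨v, List.mem_cons_of_mem _ hv, hv2⟩
        · rintro (h1 | ⟨v, hv, hv2⟩)
          · exact Or.inl (Or.inl h1)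
          · rcases List.mem_cons.mp hv with rfl | hv
            · rw [h] at hv2
              injection hv2 with hv2; injection hv2 with _ h2
              exact Or.inl (Or.inr h2.symm)
            · exact Or.inr ⟨v, hv, hv2⟩
      · rw [PySem.Dict.getD_modify, if_neg hn]
        constructor
        · rintro (h1 | ⟨v, hv, hv2⟩)
          · exact Or.inl h1
          · exact Or.inr ⟨v, List.mem_cons_of_mem _ hv, hv2⟩
        · rintro (h1 | ⟨v, hv, hv2⟩)
          · exact Or.inl h1
          · rcases List.mem_cons.mp hv with rfl | hv
            · rw [h] at hv2
              injection hv2 with hv2; injection hv2 with h1 _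
              exact absurd h1.symm hn
            · exact Or.inr ⟨v, hv, hv2⟩

theorem pvNodup_inv (name : String) (xs : List String) :
    ∀ st : PySem.Dict String (PySem.Set Nat) × List String,
      (st.1.getD name []).Nodup → ((xs.foldl pvStep st).1.getD name []).Nodup := by
  induction xs with
  | nil => intro st h; simpa using h
  | cons u t ih =>
    intro st h
    cases hg : pvRIndex.get? u with
    | none => simp only [List.foldl_cons, pvStep, hg]; exact ih _ h
    | some p =>
      obtain ⟨n', pos⟩ := p
      simp only [List.foldl_cons, pvStep, hg]
      apply ih
      simp only [PySem.Dict.getD_modify]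
      by_cases hn : name = n'
      · subst hn; rw [if_pos rfl]; exact PySem.Set.nodup_add _ _ h
      · simp only [if_neg hn]; exact h

-- literal values of the three section lists
theorem pvL1Val : pvL1 = [
  "b529448b-4d60-346e-e89e-00a4c527a405",
  "2fe4ed3a-450a-948b-6d6b-e89a78e680a9",
  "2bee0dc9-4ffe-519b-1cbd-7fbe763a6047",
  "2c9d57ec-4431-9c5e-2939-8f9ef6dd5cba",
  "2fb9a4fd-47b8-4e7d-a969-74b4046ebd53",
  "d960549e-485c-e861-8d71-aa9d1aed12a2",
  "fd267378-4d1d-484f-ff52-77821ed10dc2"] := by decide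

theorem pvL2Val : pvL2 = [
  "224b0a95-48b9-f703-1bd8-67aca101a61f",
  "7eaecc1b-4337-bbf6-6ab9-04b8f06b3319",
  "92584fbe-486a-b1b2-9faa-39b0f486b498",
  "1c18ab1f-420d-0d8b-71d0-77ad3c439115",
  "e2ad5c54-4114-a870-9641-8ea21279579a"] := by decide

theorem pvL3Val : pvL3 = [
  "2c09d728-42d5-30d8-43dc-96a05cc7ee9d",
  "690b3ed2-4dff-945b-8223-6da834e30d24",
  "12452a9d-48c3-0b02-e7eb-0381c3520404",
  "d6336a5a-428f-c591-98db-c8a291159134",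
  "de28aa9b-4cbe-1003-320e-6cb3ec309557"] := by decide

-- per-section characterization of the reverse index
theorem pvRChar1 (u : String) (i : Nat) :
    pvRIndex.get? u = some ("Competitive", i) ↔ i < 7 ∧ pvL1.getD i "" = u := by
  rw [PySem.Dict.get?_eq_some_iff_mem_items _ _ _ (by rw [pvRIndexVal]; decide),
    pvRIndexVal, pvL1Val]
  simp only [List.mem_cons, List.not_mem_nil, or_false, Prod.mk.injEq]
  simp
  constructor
  · rintro (⟨rfl, rfl⟩ | ⟨rfl, rfl⟩ | ⟨rfl, rfl⟩ | ⟨rfl, rfl⟩ | ⟨rfl, rfl⟩ | ⟨rfl, rfl⟩ | ⟨rfl, rfl⟩) <;> exact ⟨by omega, rfl⟩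
  · rintro ⟨hi, rfl⟩
    interval_cases i <;> decide

-- per-section characterization of the reverse index
theorem pvRChar2 (u : String) (i : Nat) :
    pvRIndex.get? u = some ("Standard", i) ↔ i < 5 ∧ pvL2.getD i "" = u := by
  rw [PySem.Dict.get?_eq_some_iff_mem_items _ _ _ (by rw [pvRIndexVal]; decide),
    pvRIndexVal, pvL2Val]
  simp only [List.mem_cons, List.not_mem_nil, or_false, Prod.mk.injEq]
  simp
  constructor
  · rintro (⟨rfl, rfl⟩ | ⟨rfl, rfl⟩ | ⟨rfl, rfl⟩ | ⟨rfl, rfl⟩ | ⟨rfl, rfl⟩) <;> exact ⟨by omega, rfl⟩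
  · rintro ⟨hi, rfl⟩
    interval_cases i <;> decide

-- per-section characterization of the reverse index
theorem pvRChar3 (u : String) (i : Nat) :
    pvRIndex.get? u = some ("Team Deathmatch", i) ↔ i < 5 ∧ pvL3.getD i "" = u := by
  rw [PySem.Dict.get?_eq_some_iff_mem_items _ _ _ (by rw [pvRIndexVal]; decide),
    pvRIndexVal, pvL3Val]
  simp only [List.mem_cons, List.not_mem_nil, or_false, Prod.mk.injEq]
  simp
  constructor
  · rintro (⟨rfl, rfl⟩ | ⟨rfl, rfl⟩ | ⟨rfl, rfl⟩ | ⟨rfl, rfl⟩ | ⟨rfl, rfl⟩) <;> exact ⟨by omega, rfl⟩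
  · rintro ⟨hi, rfl⟩
    interval_cases i <;> decide

theorem pvRNone (u : String) :
    (pvRIndex.get? u).isNone = true ↔ u ∉ pvL1 ∧ u ∉ pvL2 ∧ u ∉ pvL3 := by
  have h : (pvRIndex.get? u).isNone = !(pvRIndex.contains u) := by
    rw [PySem.Dict.contains_eq_isSome_get?]
    cases pvRIndex.get? u <;> rfl
  rw [h, pvL1Val, pvL2Val, pvL3Val, pvRIndexVal, PySem.Dict.contains_eq_decide_mem_keys]
  simp only [PySem.Dict.keys, List.map_cons, List.map_nil, List.mem_cons,
    List.not_mem_nil, or_false, Bool.not_eq_true', decide_eq_false_iff_not]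
  tauto

-- index-set reconstruction: mapping getD over the filtered range is the filter of the list
theorem pvRecon (L : List String) (P : String → Bool) :
    ((List.range L.length).filter (fun i => P (L.getD i ""))).map (fun i => L.getD i "") =
      L.filter P := by
  induction L with
  | nil => simp
  | cons a t ih =>
    rw [List.length_cons, List.range_succ_eq_map]
    cases hP : P a <;>
      simp [List.filter_map, List.map_map, Function.comp_def, hP] at ih ⊢ <;>
      exact ih

-- the final state of the classification pass, per section
def pvS (xs : List String) (name : String) : PySem.Set Nat :=
  (xs.foldl pvStep (pvHits0, [])).1.getD name []

theorem pvHits0_getD (name : String) : pvHits0.getD name [] = [] := by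
  have h : pvHits0 = PySem.Dict.mk
      [("Competitive", []), ("Standard", []), ("Team Deathmatch", [])] := by decide
  rw [h, PySem.Dict.getD_eq_get?_getD]
  simp only [PySem.Dict.get?_mk_cons]
  split_ifs <;> rfl

theorem pvS_mem (xs : List String) (name : String) (i : Nat) :
    i ∈ pvS xs name ↔ ∃ u ∈ xs, pvRIndex.get? u = some (name, i) := by
  unfold pvS
  rw [pvMem_inv, pvHits0_getD]
  simp

theorem pvS_nodup (xs : List String) (name : String) : (pvS xs name).Nodup := by
  unfold pvS
  exact pvNodup_inv name xs _ (by rw [pvHits0_getD]; exact List.nodup_nil)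

-- the sorted hit positions, mapped back through the section list, are A's filter
theorem pvSec (xs L : List String) (name : String)
    (hchar : ∀ u i, pvRIndex.get? u = some (name, i) ↔ i < L.length ∧ L.getD i "" = u) :
    (PySem.List.sorted (pvS xs name) (fun x => x) false).map (fun i => L.getD i "") =
      pvC L xs := by
  have hmem : ∀ i, i ∈ pvS xs name ↔ i < L.length ∧ L.getD i "" ∈ xs := by
    intro i
    rw [pvS_mem]
    constructor
    · rintro ⟨u, hu, h⟩
      rw [hchar] at h
      exact ⟨h.1, h.2 ▸ hu⟩
    · rintro ⟨hi, hm⟩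
      exact ⟨L.getD i "", hm, (hchar _ _).mpr ⟨hi, rfl⟩⟩
  have hsorted : PySem.List.sorted (pvS xs name) (fun x => x) false =
      (List.range L.length).filter (fun i => decide (L.getD i "" ∈ xs)) := by
    apply PySem.List.sorted_eq_of_perm_of_pairwise_lt
    · rw [List.perm_ext_iff_of_nodup (List.nodup_range.filter _) (pvS_nodup xs name)]
      intro i
      rw [hmem, List.mem_filter, List.mem_range]
      simp
    · exact (List.pairwise_lt_range).filter _
  rw [hsorted]
  have hr := pvRecon L (fun u => decide (u ∈ xs))
  refine hr.trans ?_
  unfold pvC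
  apply List.filter_congr
  intro u _
  rw [Bool.eq_iff_iff]
  simp [PySem.Set.mem_ofList]

-- the two leftover lists agree
theorem pvLeft_eq (xs : List String) :
    pvLeftA xs = (xs.foldl pvStep (pvHits0, ([] : List String))).2 := by
  rw [pvLeft_inv, List.nil_append]
  unfold pvLeftA
  apply List.filter_congr
  intro u hu
  rw [Bool.eq_iff_iff, pvRNone, Bool.not_eq_true', ← Bool.not_eq_true,
    PySem.Set.contains_iff]
  simp only [PySem.Set.mem_update, pvC, List.mem_filter, PySem.Set.contains_iff,
    PySem.Set.mem_ofList, PySem.Set.empty, List.not_mem_nil, false_or, hu, and_true]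
  tauto

-- B unfolded to its three sections
theorem pvB_eq (xs : List String) :
    get_map_sections_alt xs =
      [("Competitive", (PySem.List.sorted (pvS xs "Competitive") (fun x => x) false).map
          (fun i => pvL1.getD i "")),
       ("Standard", (PySem.List.sorted (pvS xs "Standard") (fun x => x) false).map
          (fun i => pvL2.getD i "") ++ (xs.foldl pvStep (pvHits0, [])).2),
       ("Team Deathmatch", (PySem.List.sorted (pvS xs "Team Deathmatch") (fun x => x) false).map
          (fun i => pvL3.getD i ""))] := rfl

-- ===== VERDICT (by name: the statement is the Claim_ definition above) =====
theorem get_map_sections_spec : Claim_equal_get_map_sections := by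
  intro xs _
  unfold Spec_get_map_sections
  rw [pvA_eq, pvB_eq]
  have hc1 : ∀ u i, pvRIndex.get? u = some ("Competitive", i) ↔
      i < pvL1.length ∧ pvL1.getD i "" = u := by
    intro u i
    have h := pvRChar1 u i
    rw [pvL1Val] at h ⊢
    simpa using h
  have hc2 : ∀ u i, pvRIndex.get? u = some ("Standard", i) ↔
      i < pvL2.length ∧ pvL2.getD i "" = u := by
    intro u i
    have h := pvRChar2 u i
    rw [pvL2Val] at h ⊢
    simpa using h
  have hc3 : ∀ u i, pvRIndex.get? u = some ("Team Deathmatch", i) ↔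
      i < pvL3.length ∧ pvL3.getD i "" = u := by
    intro u i
    have h := pvRChar3 u i
    rw [pvL3Val] at h ⊢
    simpa using h
  rw [pvSec xs pvL1 "Competitive" hc1, pvSec xs pvL2 "Standard" hc2,
      pvSec xs pvL3 "Team Deathmatch" hc3, pvLeft_eq]
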